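-- pv_equiv track=rewrite | github.com/frootin/graphs | graphs_type.py | connection_type
-- ===== SOURCE A (Python) =====
-- def connection_type (v: int, r: int, links: list[tuple[int, int]]) -> int:
--     """
--     Function figures out the type of not full connected graphs (networks).
--
--     :param v: number of nodes graph has
--     :param r: number of edges graph has
--     :param links: tuples containing two connected nodes each
--     :return: number used as a key in the outer dict with connection types as values
--
--     :example:
--
--     >>> connection_type(3, 2, [(1, 2), (2, 1), (2, 3), (3, 2)])
--     4
--     >>> connection_type(5, 5, [(1, 2), (2, 1), (1, 3), (3, 1), (1, 4), (4, 1), (1, 5), (5, 1), (2, 3),(3, 2)])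
--     4
--     >>> connection_type(5, 5, [(1, 2), (2, 1), (2, 3), (3, 2), (3, 4), (4, 3), (4, 5), (5, 4), (5, 1), (1, 5)])
--     1
--     >>> connection_type(5, 4, [(1, 2), (2, 1), (2, 3), (3, 2), (3, 4), (4, 3), (4, 5), (5, 4)])
--     2
--     >>> connection_type(5, 4, [(1, 2), (2, 1), (1, 3), (3, 1), (1, 4), (4, 1), (1, 5), (5, 1)])
--     3
--     """
--     if v == 3:
--         return 4
--
--     connections = {}
--     for link in links:
--         if link[0] in connections:
--             connections[link[0]] += 1
--         else:
--             connections[link[0]] = 1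
--
--     uni = set(connections.values())
--
--     if len(uni) == 1 and v == r:
--         return 1
--     if uni == {1, 2} and v - r == 1:
--         return 2
--     if uni == {1, r}:
--         return 3
--
--     return 4
-- ===== SOURCE B (Python) =====
-- def connection_type(v: int, r: int, links: list[tuple[int, int]]) -> int:
--     if v == 3:
--         return 4
--     firsts = sorted(x for x, _ in links)
--     runs = []
--     if firsts:
--         cur = firsts[0]
--         n = 1
--         for x in firsts[1:]:
--             if x == cur:
--                 n += 1
--             else:
--                 runs.append(n)
--                 cur = x
--                 n = 1
--         runs.append(n)
--     uni = set(runs)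
--     if len(uni) == 1 and v == r:
--         return 1
--     if uni == {1, 2} and v - r == 1:
--         return 2
--     if uni == {1, r}:
--         return 3
--     return 4
-- ===== Notes on version B (the rewrite author's own statement) =====
-- stated objective: alternative
-- what changed: Replaces A's hash-based counting dict with a sort-then-group pass: the first elements of links are sorted and out-degrees are read off as the lengths of consecutive equal runs, feeding the same three set conditions.
import Mathlib
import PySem

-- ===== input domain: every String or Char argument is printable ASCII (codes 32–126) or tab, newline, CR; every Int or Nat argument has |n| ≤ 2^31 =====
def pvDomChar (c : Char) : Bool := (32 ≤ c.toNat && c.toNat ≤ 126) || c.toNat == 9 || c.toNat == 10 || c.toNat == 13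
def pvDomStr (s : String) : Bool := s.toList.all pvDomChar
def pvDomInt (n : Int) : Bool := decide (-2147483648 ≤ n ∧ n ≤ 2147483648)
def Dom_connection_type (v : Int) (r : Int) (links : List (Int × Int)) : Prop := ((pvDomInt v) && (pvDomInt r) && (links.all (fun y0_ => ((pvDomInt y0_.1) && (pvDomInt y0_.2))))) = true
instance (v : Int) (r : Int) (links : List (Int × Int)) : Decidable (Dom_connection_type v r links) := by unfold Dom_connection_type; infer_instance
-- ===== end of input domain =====

-- B replaces A's hash-counting dict by a sort-then-group pass: it sorts the first elements of
-- `links` and reads each out-degree off as the length of a consecutive equal run (alternative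
-- algorithm, same return value).

-- ===== PORT A =====
def connection_type (v : Int) (r : Int) (links : List (Int × Int)) : Int :=
  if v == 3 then 4
  else
    let connections : PySem.Dict Int Int :=
      links.foldl (fun d link =>
        if d.contains link.1 then d.insert link.1 (d.getD link.1 0 + 1)
        else d.insert link.1 1) PySem.Dict.empty
    let uni : PySem.Set Int := PySem.Set.ofList connections.values
    if PySem.Set.len uni == 1 && v == r then 1
    else if PySem.Set.equal uni (PySem.Set.ofList [1, 2]) && v - r == 1 then 2
    else if PySem.Set.equal uni (PySem.Set.ofList [1, r]) then 3
    else 4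

-- ===== PORT B =====
def connection_type_alt (v : Int) (r : Int) (links : List (Int × Int)) : Int :=
  if v == 3 then 4
  else
    let firsts : List Int := PySem.List.sorted (links.map (fun x => x.1)) (fun x => x) false
    let runs : List Int :=
      match firsts with
      | [] => []
      | f :: rest =>
        -- for x in firsts[1:] with state (runs, cur, n); then runs.append(n)
        let st := rest.foldl
          (fun (s : List Int × Int × Int) x =>
            if x == s.2.1 then (s.1, s.2.1, s.2.2 + 1) else (s.1 ++ [s.2.2], x, 1))
          ([], f, 1)
        st.1 ++ [st.2.2]
    let uni : PySem.Set Int := PySem.Set.ofList runs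
    if PySem.Set.len uni == 1 && v == r then 1
    else if PySem.Set.equal uni (PySem.Set.ofList [1, 2]) && v - r == 1 then 2
    else if PySem.Set.equal uni (PySem.Set.ofList [1, r]) then 3
    else 4

-- ===== PRECONDITION & SPEC =====
def Spec_connection_type (v : Int) (r : Int) (links : List (Int × Int)) (out : Int) : Prop := out = connection_type_alt v r links
instance (v : Int) (r : Int) (links : List (Int × Int)) (out : Int) : Decidable (Spec_connection_type v r links out) := by unfold Spec_connection_type; infer_instance

-- ===== CLAIM (what is proved, stated in full; the proofs are below) =====
def Claim_equal_connection_type : Prop := ∀ (v : Int) (r : Int) (links : List (Int × Int)), Dom_connection_type v r links → Spec_connection_type v r links (connection_type v r links)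

-- ===== LEMMAS AND PROOFS =====

-- A's guarded branch is exactly the unguarded getD-based insert (getD is 0 when absent).
lemma counter_step_eq (d : PySem.Dict Int Int) (x : Int) :
    (if d.contains x then d.insert x (d.getD x 0 + 1) else d.insert x 1)
      = d.insert x (d.getD x 0 + 1) := by
  by_cases h : d.contains x = true
  · simp [h]
  · have h0 : d.getD x 0 = 0 := PySem.Dict.getD_of_not_contains d 0 (by simpa using h)
    simp [h, h0]

-- the run-length scan of B, written as a structural recursion
def runsGo (cur n : Int) : List Int → List Int
  | [] => [n]
  | y :: ys => if y == cur then runsGo cur (n + 1) ys else n :: runsGo y 1 ys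

def runStep (s : List Int × Int × Int) (x : Int) : List Int × Int × Int :=
  if x == s.2.1 then (s.1, s.2.1, s.2.2 + 1) else (s.1 ++ [s.2.2], x, 1)

-- B's foldl over the tail equals the recursion runsGo
lemma fold_runs (acc : List Int) (cur n : Int) (ys : List Int) :
    (ys.foldl runStep (acc, cur, n)).1 ++ [(ys.foldl runStep (acc, cur, n)).2.2]
      = acc ++ runsGo cur n ys := by
  induction ys generalizing acc cur n with
  | nil => simp [runsGo]
  | cons y ys ih =>
    simp only [List.foldl_cons, runsGo]
    by_cases h : y = cur
    · subst h
      simp only [runStep, beq_self_eq_true, if_true]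
      exact ih acc y (n + 1)
    · have hb : ¬ ((y == cur) = true) := by simp [h]
      rw [runStep, if_neg hb, if_neg hb]
      rw [ih (acc ++ [n]) y 1]
      simp

lemma discard_cons_self (s : List Int) (y : Int) :
    PySem.Set.discard (y :: s) y = PySem.Set.discard s y := by
  simp [PySem.Set.discard]

lemma discard_idem (s : List Int) (y : Int) :
    PySem.Set.discard (PySem.Set.discard s y) y = PySem.Set.discard s y := by
  simp [PySem.Set.discard, List.filter_filter]

-- on a sorted tail whose elements are ≥ cur, runsGo lists the multiplicity of cur
-- (offset by n) followed by the multiplicities of the remaining distinct elements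
lemma runsGo_spec (cur n : Int) (ys : List Int)
    (hall : ∀ y ∈ ys, cur ≤ y) (hsort : ys.Pairwise (· ≤ ·)) :
    runsGo cur n ys
      = (n + (ys.count cur : Int))
          :: (PySem.Set.discard (PySem.Set.ofList ys) cur).map (fun x => ((ys.count x : Int))) := by
  induction ys generalizing cur n with
  | nil => simp [runsGo, PySem.Set.discard]
  | cons y ys ih =>
    have hsort' : ys.Pairwise (· ≤ ·) := hsort.tail
    have hy : ∀ z ∈ ys, y ≤ z := fun z hz => List.rel_of_pairwise_cons hsort hz
    by_cases h : y = cur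
    · subst h
      rw [runsGo, if_pos (by simp), ih y (n + 1) hy hsort']
      rw [PySem.Set.ofList_cons, discard_cons_self, discard_idem]
      simp only [List.cons.injEq]
      refine ⟨by simp; ring_nf, ?_⟩
      apply List.map_congr_left
      intro x hx
      have hxne : x ≠ y := ((PySem.Set.mem_discard _ _ _).mp hx).2
      simp [Ne.symm hxne]
    · have hcur_lt : cur < y := lt_of_le_of_ne (hall y (by simp)) (Ne.symm h)
      have hcur_notin : cur ∉ y :: ys := by
        intro hmem
        rcases List.mem_cons.mp hmem with h1 | h1
        · exact h h1.symm
        · exact absurd (hy cur h1) (not_le.mpr hcur_lt)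
      have hcount0 : (y :: ys).count cur = 0 := List.count_eq_zero.mpr hcur_notin
      have hdisc : PySem.Set.discard (PySem.Set.ofList (y :: ys)) cur
          = PySem.Set.ofList (y :: ys) := by
        simp only [PySem.Set.discard]
        apply List.filter_eq_self.mpr
        intro a ha
        have ha' : a ∈ y :: ys := (PySem.Set.mem_ofList _ _).mp ha
        have : a ≠ cur := fun he => hcur_notin (he ▸ ha')
        simp [this]
      rw [runsGo, if_neg (by simp [h]), ih y 1 hy hsort', hdisc, hcount0,
        PySem.Set.ofList_cons]
      simp only [List.map_cons, List.cons.injEq]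
      refine ⟨by simp, by simp; ring_nf, ?_⟩
      apply List.map_congr_left
      intro x hx
      have hxne : x ≠ y := ((PySem.Set.mem_discard _ _ _).mp hx).2
      simp [Ne.symm hxne]

-- the elements of B's run-length list of a sorted list are exactly the multiplicities
lemma mem_runsGo (f : Int) (rest : List Int) (hs : (f :: rest).Pairwise (· ≤ ·)) (c : Int) :
    c ∈ runsGo f 1 rest ↔ ∃ x ∈ f :: rest, ((f :: rest).count x : Int) = c := by
  rw [runsGo_spec f 1 rest (fun z hz => List.rel_of_pairwise_cons hs hz) hs.tail]
  constructor
  · intro hc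
    rcases List.mem_cons.mp hc with hc | hc
    · exact ⟨f, by simp, by rw [hc]; simp; ring_nf⟩
    · simp only [List.mem_map] at hc
      rcases hc with ⟨x, hx, hxc⟩
      have hxmem := ((PySem.Set.mem_discard _ _ _).mp hx).1
      have hxne := ((PySem.Set.mem_discard _ _ _).mp hx).2
      refine ⟨x, by simp [(PySem.Set.mem_ofList _ _).mp hxmem], ?_⟩
      rw [← hxc]; simp [Ne.symm hxne]
  · rintro ⟨x, hx, hxc⟩
    by_cases hxf : x = f
    · subst hxf
      apply List.mem_cons.mpr; left
      rw [← hxc]; simp; ring_nf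
    · apply List.mem_cons.mpr; right
      have hxr : x ∈ rest := by
        rcases List.mem_cons.mp hx with h1 | h1
        · exact absurd h1 hxf
        · exact h1
      refine List.mem_map.mpr ⟨x, ?_, ?_⟩
      · exact (PySem.Set.mem_discard _ _ _).mpr ⟨(PySem.Set.mem_ofList _ _).mpr hxr, hxf⟩
      · rw [← hxc]; simp [Ne.symm hxf]

-- the three set-based conditions depend only on the membership of the underlying list
lemma chain_congr (v r : Int) (l1 l2 : List Int) (h : ∀ x, x ∈ l1 ↔ x ∈ l2) :
    (if PySem.Set.len (PySem.Set.ofList l1) == 1 && v == r then (1 : Int)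
     else if PySem.Set.equal (PySem.Set.ofList l1) (PySem.Set.ofList [1, 2]) && v - r == 1 then 2
     else if PySem.Set.equal (PySem.Set.ofList l1) (PySem.Set.ofList [1, r]) then 3
     else 4)
    = (if PySem.Set.len (PySem.Set.ofList l2) == 1 && v == r then (1 : Int)
     else if PySem.Set.equal (PySem.Set.ofList l2) (PySem.Set.ofList [1, 2]) && v - r == 1 then 2
     else if PySem.Set.equal (PySem.Set.ofList l2) (PySem.Set.ofList [1, r]) then 3
     else 4) := by
  have hperm : (PySem.Set.ofList l1).Perm (PySem.Set.ofList l2) :=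
    (List.perm_ext_iff_of_nodup (PySem.Set.nodup_ofList l1) (PySem.Set.nodup_ofList l2)).mpr
      (fun a => by rw [PySem.Set.mem_ofList, PySem.Set.mem_ofList]; exact h a)
  have hlen : PySem.Set.len (PySem.Set.ofList l1) = PySem.Set.len (PySem.Set.ofList l2) := by
    simp only [PySem.Set.len, hperm.length_eq]
  have heq : ∀ t : PySem.Set Int,
      PySem.Set.equal (PySem.Set.ofList l1) t = PySem.Set.equal (PySem.Set.ofList l2) t := by
    intro t
    by_cases h1 : PySem.Set.equal (PySem.Set.ofList l1) t = true
    · rw [h1]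
      symm
      rw [PySem.Set.equal_iff] at h1 ⊢
      intro x; rw [PySem.Set.mem_ofList, ← h x, ← PySem.Set.mem_ofList]; exact h1 x
    · have h2 : PySem.Set.equal (PySem.Set.ofList l2) t ≠ true := by
        intro h2
        apply h1
        rw [PySem.Set.equal_iff] at h2 ⊢
        intro x; rw [PySem.Set.mem_ofList, h x, ← PySem.Set.mem_ofList]; exact h2 x
      simp [Bool.eq_false_iff.mpr h1, Bool.eq_false_iff.mpr h2]
  rw [hlen, heq, heq]

-- A's counter values: c is a value iff c is the multiplicity of some element
lemma mem_counter_values (xs : List Int) (c : Int) :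
    c ∈ (PySem.Dict.counter xs).values ↔ ∃ x ∈ xs, ((xs.count x : Int)) = c := by
  show c ∈ (PySem.Dict.counter xs).items.map (fun p => p.2) ↔ _
  rw [PySem.Dict.items_counter]
  simp only [List.map_map, List.mem_map, Function.comp]
  constructor
  · rintro ⟨x, hx, hc⟩
    exact ⟨x, (PySem.Set.mem_ofList _ _).mp hx, hc⟩
  · rintro ⟨x, hx, hc⟩
    exact ⟨x, (PySem.Set.mem_ofList _ _).mpr hx, hc⟩

-- ===== VERDICT (by name: the statement is the Claim_ definition above) =====
theorem connection_type_spec : Claim_equal_connection_type := by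
  intro v r links _
  show connection_type v r links = connection_type_alt v r links
  by_cases hv : v = 3
  · simp [connection_type, connection_type_alt, hv]
  · have hv' : (v == 3) = false := by simp [hv]
    rw [connection_type, connection_type_alt, hv']
    simp only [Bool.false_eq_true, if_false]
    have hA : (links.foldl (fun d link =>
        if d.contains link.1 then d.insert link.1 (d.getD link.1 0 + 1)
        else d.insert link.1 1) PySem.Dict.empty)
        = PySem.Dict.counter (links.map (fun x => x.1)) := by
      rw [← PySem.Dict.foldl_insert_getD_add_one_eq_counter, List.foldl_map]
      congr 1
      funext d link
      exact counter_step_eq d link.1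
    rw [hA]
    have hperm : (PySem.List.sorted (links.map (fun x => x.1)) (fun x => x) false).Perm
        (links.map (fun x => x.1)) :=
      PySem.List.sorted_perm (links.map (fun x => x.1)) (fun x => x) false
    apply chain_congr
    intro c
    rw [mem_counter_values (links.map (fun x => x.1)) c]
    cases hcase : PySem.List.sorted (links.map (fun x => x.1)) (fun x => x) false with
    | nil =>
      have hnil : links.map (fun x => x.1) = [] := ((hcase ▸ hperm).symm).eq_nil
      simp [hnil]
    | cons f rest =>
      have hpair : (f :: rest).Pairwise (· ≤ ·) := by
        have hp := PySem.List.sorted_pairwise (links.map (fun x => x.1)) (fun x => x)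
        rw [hcase] at hp
        exact hp
      have hform : (match f :: rest with
          | [] => ([] : List Int)
          | f :: rest =>
            let st := rest.foldl
              (fun (s : List Int × Int × Int) x =>
                if x == s.2.1 then (s.1, s.2.1, s.2.2 + 1) else (s.1 ++ [s.2.2], x, 1))
              ([], f, 1)
            st.1 ++ [st.2.2])
          = (rest.foldl runStep ([], f, 1)).1 ++ [(rest.foldl runStep ([], f, 1)).2.2] := rfl
      rw [hform, fold_runs, List.nil_append, mem_runsGo f rest hpair c]
      constructor
      · rintro ⟨x, hx, hc⟩
        refine ⟨x, by rw [← hcase]; exact hperm.mem_iff.mpr hx, ?_⟩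
        rw [← hc, ← hcase]
        exact_mod_cast hperm.count_eq x
      · rintro ⟨x, hx, hc⟩
        refine ⟨x, hperm.mem_iff.mp (hcase ▸ hx), ?_⟩
        rw [← hc, ← hcase]
        exact_mod_cast (hperm.count_eq x).symm
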